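-- pv_equiv track=rewrite | github.com/jeranaias/nahawi | lora_experiment/classify_error_fixed.py | get_char_diff
-- ===== SOURCE A (Python) =====
-- def get_char_diff(src, tgt):
--     """Find the character-level differences between two words."""
--     # Simple: find positions where chars differ
--     diffs = []
--     min_len = min(len(src), len(tgt))
--
--     for i in range(min_len):
--         if src[i] != tgt[i]:
--             diffs.append((i, src[i], tgt[i]))
--
--     # Handle length differences
--     if len(src) > len(tgt):
--         for i in range(min_len, len(src)):
--             diffs.append((i, src[i], None))  # deleted
--     elif len(tgt) > len(src):
--         for i in range(min_len, len(tgt)):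
--             diffs.append((i, None, tgt[i]))  # inserted
--
--     return diffs
-- ===== SOURCE B (Python) =====
-- from itertools import zip_longest
--
-- def get_char_diff(src, tgt):
--     """Find the character-level differences between two words."""
--     return [(i, s, t)
--             for i, (s, t) in enumerate(zip_longest(src, tgt, fillvalue=None))
--             if s != t]
-- ===== Notes on version B (the rewrite author's own statement) =====
-- stated objective: idiomatic
-- what changed: Replaces the three-phase structure (common-prefix index loop plus two length-difference branches) by a single comprehension over enumerate(zip_longest(src, tgt)), which yields all three kinds of tuples uniformly.
import Mathlib
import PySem

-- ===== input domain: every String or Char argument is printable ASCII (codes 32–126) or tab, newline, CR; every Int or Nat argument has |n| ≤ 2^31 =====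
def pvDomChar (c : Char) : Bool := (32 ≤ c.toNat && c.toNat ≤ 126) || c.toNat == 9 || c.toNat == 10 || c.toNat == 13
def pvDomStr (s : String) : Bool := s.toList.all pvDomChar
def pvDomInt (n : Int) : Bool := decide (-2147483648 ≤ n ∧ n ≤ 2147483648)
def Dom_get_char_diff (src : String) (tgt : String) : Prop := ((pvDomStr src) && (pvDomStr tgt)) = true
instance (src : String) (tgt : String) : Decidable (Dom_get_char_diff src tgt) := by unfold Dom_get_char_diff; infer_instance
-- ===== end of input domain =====

-- B replaces A's three loops (common prefix, then one of two tail loops) by one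
-- uniform pass over the zip_longest pairing; same O(n) cost, fewer cases (objective: idiomatic).

-- ===== PORT A =====
-- A: common-prefix index loop, then a tail loop chosen by comparing the lengths.
def get_char_diff (src : String) (tgt : String) : List (Int × Option String × Option String) :=
  let s := src.toList
  let t := tgt.toList
  let minLen : Int := min (s.length : Int) (t.length : Int)
  let diffs :=
    (PySem.List.pyRange 0 minLen 1).foldl
      (fun acc i =>
        if PySem.List.pyGetD s i ' ' ≠ PySem.List.pyGetD t i ' ' then
          acc ++ [(i, some (String.ofList [PySem.List.pyGetD s i ' ']),
                      some (String.ofList [PySem.List.pyGetD t i ' ']))]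
        else acc) []
  if (s.length : Int) > (t.length : Int) then
    (PySem.List.pyRange minLen (s.length : Int) 1).foldl
      (fun acc i => acc ++ [(i, some (String.ofList [PySem.List.pyGetD s i ' ']), none)]) diffs
  else if (t.length : Int) > (s.length : Int) then
    (PySem.List.pyRange minLen (t.length : Int) 1).foldl
      (fun acc i => acc ++ [(i, none, some (String.ofList [PySem.List.pyGetD t i ' ']))]) diffs
  else diffs

-- ===== PORT B =====
-- B: one structural pass over the zip_longest pairing, carrying the index.
def zipLongestDiff (i : Int) : List Char → List Char → List (Int × Option String × Option String)
  | [], [] => []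
  | a :: ss, b :: ts =>
      (if a ≠ b then [(i, some (String.ofList [a]), some (String.ofList [b]))] else []) ++
        zipLongestDiff (i + 1) ss ts
  | a :: ss, [] => (i, some (String.ofList [a]), none) :: zipLongestDiff (i + 1) ss []
  | [], b :: ts => (i, none, some (String.ofList [b])) :: zipLongestDiff (i + 1) [] ts

def get_char_diff_alt (src : String) (tgt : String) : List (Int × Option String × Option String) :=
  zipLongestDiff 0 src.toList tgt.toList

-- ===== PRECONDITION & SPEC =====
def Spec_get_char_diff (src : String) (tgt : String) (out : List (Int × Option String × Option String)) : Prop := out = get_char_diff_alt src tgt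
instance (src : String) (tgt : String) (out : List (Int × Option String × Option String)) : Decidable (Spec_get_char_diff src tgt out) := by unfold Spec_get_char_diff; infer_instance

-- ===== CLAIM (what is proved, stated in full; the proofs are below) =====
def Claim_equal_get_char_diff : Prop := ∀ (src : String) (tgt : String), Dom_get_char_diff src tgt → Spec_get_char_diff src tgt (get_char_diff src tgt)

-- ===== LEMMAS AND PROOFS =====

-- the common-prefix part of B's pass, as its own recursion
def commonDiffs (i : Int) : List Char → List Char → List (Int × Option String × Option String)
  | a :: ss, b :: ts =>
      (if a ≠ b then [(i, some (String.ofList [a]), some (String.ofList [b]))] else []) ++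
        commonDiffs (i + 1) ss ts
  | _, _ => []

-- the deleted-tail / inserted-tail parts of B's pass
def tailDel (i : Int) : List Char → List (Int × Option String × Option String)
  | [] => []
  | a :: ss => (i, some (String.ofList [a]), none) :: tailDel (i + 1) ss

def tailIns (i : Int) : List Char → List (Int × Option String × Option String)
  | [] => []
  | b :: ts => (i, none, some (String.ofList [b])) :: tailIns (i + 1) ts

lemma zipLongestDiff_nil_left (t : List Char) (i : Int) :
    zipLongestDiff i [] t = tailIns i t := by
  induction t generalizing i with
  | nil => simp [zipLongestDiff, tailIns]
  | cons b ts ih => simp [zipLongestDiff, tailIns, ih]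

lemma zipLongestDiff_nil_right (s : List Char) (i : Int) :
    zipLongestDiff i s [] = tailDel i s := by
  induction s generalizing i with
  | nil => simp [zipLongestDiff, tailDel]
  | cons a ss ih => simp [zipLongestDiff, tailDel, ih]

lemma zipLongestDiff_eq (s t : List Char) (i : Int) :
    zipLongestDiff i s t =
      commonDiffs i s t ++
        tailDel (i + (min s.length t.length : Nat)) (s.drop t.length) ++
        tailIns (i + (min s.length t.length : Nat)) (t.drop s.length) := by
  induction s generalizing t i with
  | nil =>
    cases t with
    | nil => simp [zipLongestDiff, commonDiffs, tailDel, tailIns]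
    | cons b ts => simp [zipLongestDiff_nil_left, commonDiffs, tailDel, tailIns]
  | cons a ss ih =>
    cases t with
    | nil => simp [zipLongestDiff_nil_right, commonDiffs, tailDel, tailIns]
    | cons b ts =>
      have hc : ∀ (n m : Nat), ((min (n+1) (m+1) : Nat) : Int) = ((min n m : Nat) : Int) + 1 := by
        intro n m; omega
      simp only [zipLongestDiff, commonDiffs, List.length_cons, List.drop_succ_cons, hc]
      rw [ih ts (i+1)]
      simp [add_comm, add_left_comm]

lemma common_foldl (s t : List Char) (k : Int) (acc : List (Int × Option String × Option String)) :
    (List.range (min s.length t.length)).foldl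
      (fun acc m =>
        if s.getD m ' ' ≠ t.getD m ' ' then
          acc ++ [((k + m : Int), some (String.ofList [s.getD m ' ']), some (String.ofList [t.getD m ' ']))]
        else acc) acc
    = acc ++ commonDiffs k s t := by
  induction s generalizing t k acc with
  | nil => simp [commonDiffs]
  | cons a ss ih =>
    cases t with
    | nil => simp [commonDiffs]
    | cons b ts =>
      simp only [List.length_cons, Nat.succ_min_succ, List.range_succ_eq_map,
        List.foldl_cons, List.foldl_map, List.getD_cons_succ, List.getD_cons_zero,
        Nat.cast_zero, add_zero, Nat.cast_succ]
      have h : ∀ (m : Nat), k + ((m : Int) + 1) = (k + 1) + (m : Int) := by intro m; ring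
      simp only [h]
      rw [ih ts (k + 1)]
      by_cases hab : a = b <;> simp [hab, commonDiffs]

lemma tailDel_foldl (u : List Char) (k : Int) (acc : List (Int × Option String × Option String)) :
    (List.range u.length).foldl
      (fun acc (m : Nat) => acc ++ [ (k + (m : Int), some (String.ofList [u.getD m ' ']), none)]) acc
    = acc ++ tailDel k u := by
  induction u generalizing k acc with
  | nil => simp [tailDel]
  | cons a ss ih =>
    simp only [List.length_cons, List.range_succ_eq_map, List.foldl_cons, List.foldl_map,
      List.getD_cons_succ, List.getD_cons_zero, Nat.cast_zero, add_zero, Nat.cast_succ]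
    have h : ∀ (m : Nat), k + ((m : Int) + 1) = (k + 1) + (m : Int) := by intro m; ring
    simp only [h]
    rw [ih (k + 1)]
    simp [tailDel]

lemma tailIns_foldl (u : List Char) (k : Int) (acc : List (Int × Option String × Option String)) :
    (List.range u.length).foldl
      (fun acc (m : Nat) => acc ++ [ (k + (m : Int), none, some (String.ofList [u.getD m ' ']))]) acc
    = acc ++ tailIns k u := by
  induction u generalizing k acc with
  | nil => simp [tailIns]
  | cons a ss ih =>
    simp only [List.length_cons, List.range_succ_eq_map, List.foldl_cons, List.foldl_map,
      List.getD_cons_succ, List.getD_cons_zero, Nat.cast_zero, add_zero, Nat.cast_succ]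
    have h : ∀ (m : Nat), k + ((m : Int) + 1) = (k + 1) + (m : Int) := by intro m; ring
    simp only [h]
    rw [ih (k + 1)]
    simp [tailIns]

lemma common_foldl0 (s t : List Char) :
    (List.range (min s.length t.length)).foldl
      (fun acc (m : Nat) =>
        if s.getD m ' ' ≠ t.getD m ' ' then
          acc ++ [((m : Int), some (String.ofList [s.getD m ' ']), some (String.ofList [t.getD m ' ']))]
        else acc) []
    = commonDiffs 0 s t := by
  have h := common_foldl s t 0 []
  simpa using h

lemma getD_add_drop (s : List Char) (n m : Nat) :
    s.getD (n + m) ' ' = (s.drop n).getD m ' ' := by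
  simp [List.getD_eq_getElem?_getD, List.getElem?_drop]

lemma tailDel_foldl_nat (s : List Char) (n : Nat) (acc : List (Int × Option String × Option String)) :
    (List.range (s.length - n)).foldl
      (fun acc (m : Nat) => acc ++ [(((n + m : Nat) : Int), some (String.ofList [s.getD (n + m) ' ']), none)]) acc
    = acc ++ tailDel (n : Int) (s.drop n) := by
  have hgd : ∀ m : Nat, (s.drop n).getD m ' ' = s.getD (n + m) ' ' := fun m => (getD_add_drop s n m).symm
  have hc : ∀ m : Nat, (n : Int) + (m : Int) = ((n + m : Nat) : Int) := by intro m; push_cast; ring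
  have h := tailDel_foldl (s.drop n) (n : Int) acc
  simp only [hgd, hc, List.length_drop] at h
  exact h

lemma tailIns_foldl_nat (t : List Char) (n : Nat) (acc : List (Int × Option String × Option String)) :
    (List.range (t.length - n)).foldl
      (fun acc (m : Nat) => acc ++ [(((n + m : Nat) : Int), none, some (String.ofList [t.getD (n + m) ' ']))]) acc
    = acc ++ tailIns (n : Int) (t.drop n) := by
  have hgd : ∀ m : Nat, (t.drop n).getD m ' ' = t.getD (n + m) ' ' := fun m => (getD_add_drop t n m).symm
  have hc : ∀ m : Nat, (n : Int) + (m : Int) = ((n + m : Nat) : Int) := by intro m; push_cast; ring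
  have h := tailIns_foldl (t.drop n) (n : Int) acc
  simp only [hgd, hc, List.length_drop] at h
  exact h

-- ===== VERDICT (by name: the statement is the Claim_ definition above) =====
theorem get_char_diff_spec : Claim_equal_get_char_diff := by
  intro src tgt _
  unfold Spec_get_char_diff get_char_diff get_char_diff_alt
  dsimp only
  rw [zipLongestDiff_eq, ← Nat.cast_min]
  simp only [PySem.List.pyRange_one, sub_zero, Int.toNat_natCast, List.foldl_map, zero_add,
    PySem.List.pyGetD_natCast]
  generalize src.toList = s
  generalize tgt.toList = t
  have hc : ∀ (n m : Nat), (n : Int) + (m : Int) = ((n + m : Nat) : Int) := by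
    intro n m; push_cast; ring
  split_ifs with h1 h2
  · have hn : t.length ≤ s.length := by exact_mod_cast le_of_lt h1
    have hm : min s.length t.length = t.length := by omega
    have ht : ((s.length : Int) - ((t.length : Nat) : Int)).toNat = s.length - t.length := by omega
    have hcf := common_foldl0 s t
    rw [hm] at *
    simp only [hc, PySem.List.pyGetD_natCast, ht, hcf, tailDel_foldl_nat,
      List.drop_eq_nil_of_le hn, tailIns, List.append_nil]
  · have hn : s.length ≤ t.length := by exact_mod_cast le_of_lt h2
    have hm : min s.length t.length = s.length := by omega
    have ht : ((t.length : Int) - ((s.length : Nat) : Int)).toNat = t.length - s.length := by omega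
    have hcf := common_foldl0 s t
    rw [hm] at *
    simp only [hc, PySem.List.pyGetD_natCast, ht, hcf, tailIns_foldl_nat,
      List.drop_eq_nil_of_le hn, tailDel, List.append_nil]
  · have he : s.length = t.length := by omega
    have hm : min s.length t.length = t.length := by omega
    have hcf := common_foldl0 s t
    rw [hm] at *
    rw [hcf]
    have h1 : List.drop t.length s = [] := List.drop_eq_nil_of_le (by omega)
    have h2 : List.drop s.length t = [] := List.drop_eq_nil_of_le (by omega)
    simp [h1, h2, tailDel, tailIns]
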